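-- pv_equiv track=rewrite | github.com/Big0290/memory-context-manager_v2 | core/phase7/phase7_prediction_engine.py | _analyze_recent_changes
-- ===== SOURCE A (Python) =====
-- from typing import Dict, List, Any, Optional, Tuple
--
-- def _analyze_recent_changes(changes: List[str]) -> List[str]:
--     """Analyze recent changes for patterns"""
--     analyzed_changes = []
--
--     for change in changes:
--         if isinstance(change, str):
--             # Simple change analysis - can be enhanced
--             if 'test' in change.lower():
--                 analyzed_changes.append('testing_activity')
--             elif 'fix' in change.lower() or 'bug' in change.lower():
--                 analyzed_changes.append('bug_fixing')
--             elif 'refactor' in change.lower():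
--                 analyzed_changes.append('refactoring')
--             elif 'feature' in change.lower() or 'add' in change.lower():
--                 analyzed_changes.append('feature_development')
--             else:
--                 analyzed_changes.append('general_development')
--
--     return analyzed_changes
-- ===== SOURCE B (Python) =====
-- from typing import List
--
-- # B: staged overwrite passes in reverse priority order — start everything as
-- # 'general_development', then for each rule (lowest priority first) rewrite the
-- # label of every matching change; the last (highest-priority) pass wins.
-- def _analyze_recent_changes(changes: List[str]) -> List[str]:
--     lows = [c.lower() for c in changes if isinstance(c, str)]
--     labels = ['general_development'] * len(lows)
--     for kws, label in [(['feature', 'add'], 'feature_development'),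
--                        (['refactor'], 'refactoring'),
--                        (['fix', 'bug'], 'bug_fixing'),
--                        (['test'], 'testing_activity')]:
--         labels = [label if any(k in low for k in kws) else old
--                   for low, old in zip(lows, labels)]
--     return labels
-- ===== Notes on version B (the rewrite author's own statement) =====
-- stated objective: alternative
-- what changed: Replaces the per-element if/elif cascade with staged whole-list passes: every change starts as 'general_development' and four rule passes in reverse priority order overwrite matching entries, so the highest-priority matching rule wins by being applied last.
import Mathlib
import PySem

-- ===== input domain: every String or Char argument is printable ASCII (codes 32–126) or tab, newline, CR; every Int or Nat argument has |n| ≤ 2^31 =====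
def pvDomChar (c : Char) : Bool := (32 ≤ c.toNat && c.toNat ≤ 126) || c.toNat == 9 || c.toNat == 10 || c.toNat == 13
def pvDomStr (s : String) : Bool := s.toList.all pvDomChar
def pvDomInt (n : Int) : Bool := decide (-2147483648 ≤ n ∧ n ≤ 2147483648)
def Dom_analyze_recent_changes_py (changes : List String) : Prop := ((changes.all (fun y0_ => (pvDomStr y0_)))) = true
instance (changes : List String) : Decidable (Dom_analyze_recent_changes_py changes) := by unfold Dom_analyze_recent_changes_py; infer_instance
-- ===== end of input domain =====

-- B replaces A's per-element if/elif cascade with staged whole-list overwrite passes in reverse priority order.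
-- ===== PORT A =====
def analyze_recent_changes_py (changes : List String) : List String :=
  changes.foldl (fun acc change =>
    if PySem.Str.isIn "test" (PySem.Str.lower change) then acc ++ ["testing_activity"]
    else if PySem.Str.isIn "fix" (PySem.Str.lower change) || PySem.Str.isIn "bug" (PySem.Str.lower change) then acc ++ ["bug_fixing"]
    else if PySem.Str.isIn "refactor" (PySem.Str.lower change) then acc ++ ["refactoring"]
    else if PySem.Str.isIn "feature" (PySem.Str.lower change) || PySem.Str.isIn "add" (PySem.Str.lower change) then acc ++ ["feature_development"]
    else acc ++ ["general_development"]) []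

-- ===== PORT B =====
def pvRevRules : List (List String × String) :=
  [(["feature", "add"], "feature_development"), (["refactor"], "refactoring"),
   (["fix", "bug"], "bug_fixing"), (["test"], "testing_activity")]

def analyze_recent_changes_py_alt (changes : List String) : List String :=
  let lows := changes.map PySem.Str.lower
  pvRevRules.foldl (fun labels r =>
      (lows.zip labels).map (fun p =>
        if r.1.any (fun k => PySem.Str.isIn k p.1) then r.2 else p.2))
    (List.replicate lows.length "general_development")

-- ===== PRECONDITION & SPEC =====
def Spec_analyze_recent_changes_py (changes : List String) (out : List String) : Prop := out = analyze_recent_changes_py_alt changes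
instance (changes : List String) (out : List String) : Decidable (Spec_analyze_recent_changes_py changes out) := by unfold Spec_analyze_recent_changes_py; infer_instance

-- ===== CLAIM (what is proved, stated in full; the proofs are below) =====
def Claim_equal_analyze_recent_changes_py : Prop := ∀ (changes : List String), Dom_analyze_recent_changes_py changes → Spec_analyze_recent_changes_py changes (analyze_recent_changes_py changes)

-- ===== LEMMAS AND PROOFS =====

-- ===== VERDICT (by name: the statement is the Claim_ definition above) =====
def pvClassify4 (low : String) : String :=
  if PySem.Str.isIn "test" low then "testing_activity"
  else if PySem.Str.isIn "fix" low || PySem.Str.isIn "bug" low then "bug_fixing"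
  else if PySem.Str.isIn "refactor" low then "refactoring"
  else if PySem.Str.isIn "feature" low || PySem.Str.isIn "add" low then "feature_development"
  else "general_development"

lemma alt_cons (c : String) (cs : List String) :
    analyze_recent_changes_py_alt (c :: cs)
      = pvClassify4 (PySem.Str.lower c) :: analyze_recent_changes_py_alt cs := by
  simp only [analyze_recent_changes_py_alt, pvRevRules, List.foldl, List.map_cons,
    List.length_cons, List.replicate, List.zip_cons_cons, List.any_cons, List.any_nil,
    pvClassify4, Bool.or_false]

lemma alt_eq_map (cs : List String) :
    analyze_recent_changes_py_alt cs = cs.map (fun c => pvClassify4 (PySem.Str.lower c)) := by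
  induction cs with
  | nil => rfl
  | cons c cs ih => rw [alt_cons, ih, List.map_cons]

lemma a_foldl (cs : List String) (acc : List String) :
    cs.foldl (fun acc change =>
      if PySem.Str.isIn "test" (PySem.Str.lower change) then acc ++ ["testing_activity"]
      else if PySem.Str.isIn "fix" (PySem.Str.lower change) || PySem.Str.isIn "bug" (PySem.Str.lower change) then acc ++ ["bug_fixing"]
      else if PySem.Str.isIn "refactor" (PySem.Str.lower change) then acc ++ ["refactoring"]
      else if PySem.Str.isIn "feature" (PySem.Str.lower change) || PySem.Str.isIn "add" (PySem.Str.lower change) then acc ++ ["feature_development"]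
      else acc ++ ["general_development"]) acc
    = acc ++ cs.map (fun c => pvClassify4 (PySem.Str.lower c)) := by
  induction cs generalizing acc with
  | nil => simp
  | cons c cs ih =>
      rw [List.foldl_cons, ih]
      have h : (if PySem.Str.isIn "test" (PySem.Str.lower c) then acc ++ ["testing_activity"]
        else if PySem.Str.isIn "fix" (PySem.Str.lower c) || PySem.Str.isIn "bug" (PySem.Str.lower c) then acc ++ ["bug_fixing"]
        else if PySem.Str.isIn "refactor" (PySem.Str.lower c) then acc ++ ["refactoring"]
        else if PySem.Str.isIn "feature" (PySem.Str.lower c) || PySem.Str.isIn "add" (PySem.Str.lower c) then acc ++ ["feature_development"]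
        else acc ++ ["general_development"]) = acc ++ [pvClassify4 (PySem.Str.lower c)] := by
        simp only [pvClassify4]; split_ifs <;> rfl
      rw [h]; simp

theorem analyze_recent_changes_py_spec : Claim_equal_analyze_recent_changes_py := by
  intro changes _
  unfold Spec_analyze_recent_changes_py analyze_recent_changes_py
  rw [alt_eq_map]
  simpa using a_foldl changes []
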